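-- pv_equiv track=rewrite | github.com/cpr888/PODEM | python code/gates_lib.py | AND_gate
-- ===== SOURCE A (Python) =====
-- def AND_gate(input_list):
-- 	flag =0
--
-- 	for input in input_list:
--
-- 			if(input=='0'):			#Controlling_value = 0, if present , output = 0
-- 				return '0'
-- 			else:
-- 				if(input=='X'):
-- 					flag =1			#If there is atleast 1 value= X
--
-- 	if(flag==1):
-- 		return 'X'					#If there is atleast 1 value = X and no control value, output =X
-- 	else:
-- 		return '1' 					#All input is '1'
-- ===== SOURCE B (Python) =====
-- def AND_gate(input_list):
--     if '0' in input_list: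
--         return '0'
--     if 'X' in input_list:
--         return 'X'
--     return '1'
-- ===== Notes on version B (the rewrite author's own statement) =====
-- stated objective: simpler
-- what changed: Replaces the single flag-tracking loop by two sequential membership passes over the list ('0' first, then 'X'), eliminating the flag state entirely.
import Mathlib
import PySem

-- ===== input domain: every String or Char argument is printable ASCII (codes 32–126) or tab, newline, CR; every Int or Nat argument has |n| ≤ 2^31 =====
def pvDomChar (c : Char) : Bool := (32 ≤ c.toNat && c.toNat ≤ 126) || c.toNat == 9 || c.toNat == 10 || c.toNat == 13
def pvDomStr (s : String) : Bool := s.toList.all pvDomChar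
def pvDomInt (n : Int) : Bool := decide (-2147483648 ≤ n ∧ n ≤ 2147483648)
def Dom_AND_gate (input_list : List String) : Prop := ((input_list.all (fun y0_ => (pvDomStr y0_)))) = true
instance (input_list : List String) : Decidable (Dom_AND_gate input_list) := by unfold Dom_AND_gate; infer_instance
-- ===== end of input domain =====

-- B replaces A's flag-tracking loop with two sequential membership passes (simpler).


-- ===== PORT A =====
-- Loop with early return '0' and flag; ported as structural recursion carrying the flag.
def AND_gate_loop (input_list : List String) (flag : Int) : String :=
  match input_list with
  | [] => if flag = 1 then "X" else "1"
  | input :: rest =>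
    if input = "0" then "0"
    else if input = "X" then AND_gate_loop rest 1
    else AND_gate_loop rest flag

def AND_gate (input_list : List String) : String :=
  AND_gate_loop input_list 0

-- ===== PORT B =====
-- B: two sequential membership checks, no flag state.
def AND_gate_alt (input_list : List String) : String :=
  if "0" ∈ input_list then "0"
  else if "X" ∈ input_list then "X"
  else "1"

-- ===== PRECONDITION & SPEC =====
def Spec_AND_gate (input_list : List String) (out : String) : Prop := out = AND_gate_alt input_list
instance (input_list : List String) (out : String) : Decidable (Spec_AND_gate input_list out) := by unfold Spec_AND_gate; infer_instance

-- ===== CLAIM (what is proved, stated in full; the proofs are below) =====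
def Claim_equal_AND_gate : Prop := ∀ (input_list : List String), Dom_AND_gate input_list → Spec_AND_gate input_list (AND_gate input_list)

-- ===== LEMMAS AND PROOFS =====

-- ===== VERDICT (by name: the statement is the Claim_ definition above) =====
theorem AND_gate_loop_eq (l : List String) (flag : Int) :
    AND_gate_loop l flag =
      (if "0" ∈ l then "0" else if "X" ∈ l ∨ flag = 1 then "X" else "1") := by
  induction l generalizing flag with
  | nil => simp [AND_gate_loop]
  | cons x rest ih =>
    by_cases h0 : x = "0"
    · simp [AND_gate_loop, h0]
    · by_cases hx : x = "X"
      · simp [AND_gate_loop, hx, ih]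
      · simp only [AND_gate_loop, if_neg h0, if_neg hx, ih, List.mem_cons]
        have h0' : ¬ "0" = x := fun h => h0 h.symm
        have hx' : ¬ "X" = x := fun h => hx h.symm
        simp [h0', hx']

theorem AND_gate_spec : Claim_equal_AND_gate := by
  intro l _
  unfold Spec_AND_gate AND_gate AND_gate_alt
  rw [AND_gate_loop_eq]
  simp
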